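-- pv_equiv track=rewrite | github.com/Robsonnrj/dashboard-vistorias | app_dashboard_vistorias_v2.py | achar
-- ===== SOURCE A (Python) =====
-- import unicodedata
--
-- def _norm(s: str) -> str:
--     s = str(s)
--     s = unicodedata.normalize("NFKD", s).encode("ascii", "ignore").decode("ascii")
--     return s.lower().strip()
--
-- def achar(col_alvo, candidatos):
--     alvo_n = _norm(col_alvo)
--     for c in candidatos:
--         if _norm(c) == alvo_n:
--             return c
--     for c in candidatos:
--         if alvo_n in _norm(c):
--             return c
--     return None
-- ===== SOURCE B (Python) =====
-- import unicodedata
--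
-- def _norm(s: str) -> str:
--     s = str(s)
--     s = unicodedata.normalize("NFKD", s).encode("ascii", "ignore").decode("ascii")
--     return s.lower().strip()
--
-- def achar(col_alvo, candidatos):
--     # One pass: an exact normalized match wins immediately; the first
--     # substring match is remembered and returned only if no exact match exists.
--     alvo_n = _norm(col_alvo)
--     sub = None
--     for c in candidatos:
--         cn = _norm(c)
--         if cn == alvo_n:
--             return c
--         if sub is None and alvo_n in cn:
--             sub = c
--     return sub
-- ===== Notes on version B (the rewrite author's own statement) =====
-- stated objective: faster
-- what changed: Replaces A's two sequential scans (each normalizing every candidate) with a single pass that normalizes each candidate once, returning an exact match eagerly and deferring the first substring match to the end.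
import Mathlib
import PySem

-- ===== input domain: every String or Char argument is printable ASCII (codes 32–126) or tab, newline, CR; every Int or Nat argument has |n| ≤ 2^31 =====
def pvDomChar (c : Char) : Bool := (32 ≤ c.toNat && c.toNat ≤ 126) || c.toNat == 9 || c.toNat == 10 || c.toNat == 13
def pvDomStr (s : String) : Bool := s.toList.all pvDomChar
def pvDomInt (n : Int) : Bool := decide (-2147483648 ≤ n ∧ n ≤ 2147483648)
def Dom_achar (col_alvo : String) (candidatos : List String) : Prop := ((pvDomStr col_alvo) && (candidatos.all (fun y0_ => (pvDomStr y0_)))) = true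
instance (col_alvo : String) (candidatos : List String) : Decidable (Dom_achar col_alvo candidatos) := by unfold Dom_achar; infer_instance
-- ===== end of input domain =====

-- B folds A's two scans into one pass that normalizes each candidate once,
-- returning an exact match eagerly and deferring the first substring match.

-- ===== PORT A =====
-- _norm: on the ASCII domain NFKD+encode("ascii")+decode is the identity, so
-- _norm is exactly lower() then strip() (exact on the stated ASCII domain).
def pvNorm (s : String) : String := PySem.Str.strip (PySem.Str.lower s)

-- first loop of A: first candidate whose normalization equals alvo_n
def acharLoop1 (alvo_n : String) : List String → Option String
  | [] => none
  | c :: rest => if pvNorm c == alvo_n then some c else acharLoop1 alvo_n rest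

-- second loop of A: first candidate whose normalization contains alvo_n
def acharLoop2 (alvo_n : String) : List String → Option String
  | [] => none
  | c :: rest => if PySem.Str.isIn alvo_n (pvNorm c) then some c else acharLoop2 alvo_n rest

def achar (col_alvo : String) (candidatos : List String) : Option String :=
  let alvo_n := pvNorm col_alvo
  match acharLoop1 alvo_n candidatos with
  | some c => some c
  | none => acharLoop2 alvo_n candidatos

-- ===== PORT B =====
-- single pass with the deferred substring candidate as accumulator
def acharAltLoop (alvo_n : String) (sub : Option String) : List String → Option String
  | [] => sub
  | c :: rest =>
    let cn := pvNorm c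
    if cn == alvo_n then some c
    else if sub.isNone && PySem.Str.isIn alvo_n cn then acharAltLoop alvo_n (some c) rest
    else acharAltLoop alvo_n sub rest

def achar_alt (col_alvo : String) (candidatos : List String) : Option String :=
  acharAltLoop (pvNorm col_alvo) none candidatos

-- ===== PRECONDITION & SPEC =====
def Spec_achar (col_alvo : String) (candidatos : List String) (out : Option String) : Prop := out = achar_alt col_alvo candidatos
instance (col_alvo : String) (candidatos : List String) (out : Option String) : Decidable (Spec_achar col_alvo candidatos out) := by unfold Spec_achar; infer_instance

-- ===== CLAIM (what is proved, stated in full; the proofs are below) =====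
def Claim_equal_achar : Prop := ∀ (col_alvo : String) (candidatos : List String), Dom_achar col_alvo candidatos → Spec_achar col_alvo candidatos (achar col_alvo candidatos)

-- ===== LEMMAS AND PROOFS =====

-- invariant of B's single pass: an exact match wins; otherwise the recorded
-- substring candidate (if any) wins; otherwise A's second scan decides.
lemma acharAltLoop_eq (alvo_n : String) (l : List String) :
    ∀ sub : Option String, acharAltLoop alvo_n sub l =
      match acharLoop1 alvo_n l with
      | some c => some c
      | none => match sub with
                | some b => some b
                | none => acharLoop2 alvo_n l := by
  induction l with
  | nil => intro sub; cases sub <;> simp [acharAltLoop, acharLoop1, acharLoop2]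
  | cons c rest ih =>
    intro sub
    by_cases hx : pvNorm c == alvo_n
    · simp [acharAltLoop, acharLoop1, hx]
    · by_cases hs : PySem.Str.isIn alvo_n (pvNorm c)
      · cases sub with
        | none =>
          simp only [acharAltLoop, acharLoop1, acharLoop2, hx, hs, if_false, if_true,
            Option.isNone_none, Bool.true_and, if_pos]
          rw [ih (some c)]; cases acharLoop1 alvo_n rest <;> simp
        | some b =>
          simp only [acharAltLoop, acharLoop1, hx, Option.isNone_some, Bool.false_and]
          rw [ih (some b)]; cases acharLoop1 alvo_n rest <;> simp
      · cases sub with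
        | none =>
          simp only [acharAltLoop, acharLoop1, acharLoop2, hx, hs, Option.isNone_none,
            Bool.true_and]
          rw [ih none]; cases acharLoop1 alvo_n rest <;> simp
        | some b =>
          simp only [acharAltLoop, acharLoop1, hx, Option.isNone_some, Bool.false_and]
          rw [ih (some b)]; cases acharLoop1 alvo_n rest <;> simp

-- ===== VERDICT (by name: the statement is the Claim_ definition above) =====
theorem achar_spec : Claim_equal_achar := by
  intro col_alvo candidatos _
  unfold Spec_achar achar achar_alt
  rw [acharAltLoop_eq]
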